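-- pv_equiv track=rewrite | github.com/ROKOLYT/AdventOfCode | 2025/Day 9/solution.py | findSolutionNew
-- ===== SOURCE A (Python) =====
-- def findSolutionNew(data: list[tuple[int, int]]) -> int:
--     max_area = 0
--
--     for i in range(len(data)):
--         for j in range(i + 1, len(data)):
--             width = abs(data[i][0] - data[j][0]) + 1
--             height = abs(data[i][1] - data[j][1]) + 1
--             rect_area = width * height
--
--             rect_x1, rect_x2 = sorted([data[i][0], data[j][0]])
--             rect_y1, rect_y2 = sorted([data[i][1], data[j][1]])
--
--             valid = True
--
--             for k in range(len(data)):
--                 edge_p1 = data[k]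
--                 edge_p2 = data[(k + 1) % len(data)]
--
--                 edge_x1, edge_x2 = sorted([edge_p1[0], edge_p2[0]])
--                 edge_y1, edge_y2 = sorted([edge_p1[1], edge_p2[1]])
--
--                 if edge_y2 > rect_y1 and edge_y1 < rect_y2 and edge_x2 > rect_x1 and edge_x1 < rect_x2:
--                     valid = False
--                     break
--
--             if valid:
--                 max_area = max(max_area, rect_area)
--
--     return max_area
-- ===== SOURCE B (Python) =====
-- def findSolutionNew(data: list[tuple[int, int]]) -> int:
--     n = len(data)
--     boxes = [(min(p[0], q[0]), max(p[0], q[0]), min(p[1], q[1]), max(p[1], q[1]))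
--              for p, q in zip(data, data[1:] + data[:1])]
--     boxes.sort(key=lambda b: b[0])
--     best = 0
--     for i in range(n):
--         xi, yi = data[i]
--         for j in range(i + 1, n):
--             xj, yj = data[j]
--             rx1, rx2 = (xi, xj) if xi <= xj else (xj, xi)
--             ry1, ry2 = (yi, yj) if yi <= yj else (yj, yi)
--             blocked = False
--             for ex1, ex2, ey1, ey2 in boxes:
--                 if ex1 >= rx2:
--                     break
--                 if ex2 > rx1 and ey2 > ry1 and ey1 < ry2:
--                     blocked = True
--                     break
--             if not blocked:
--                 area = (rx2 - rx1 + 1) * (ry2 - ry1 + 1)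
--                 if area > best:
--                     best = area
--     return best
-- ===== Notes on version B (the rewrite author's own statement) =====
-- stated objective: faster
-- what changed: B precomputes each polygon edge's bounding box once and sorts the boxes by left x, so each pair's validity check scans a sorted prefix and stops at the first box starting at or beyond the rectangle's right edge, instead of A's re-sorting every edge's endpoints inside every pair's full inner scan.
import Mathlib
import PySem

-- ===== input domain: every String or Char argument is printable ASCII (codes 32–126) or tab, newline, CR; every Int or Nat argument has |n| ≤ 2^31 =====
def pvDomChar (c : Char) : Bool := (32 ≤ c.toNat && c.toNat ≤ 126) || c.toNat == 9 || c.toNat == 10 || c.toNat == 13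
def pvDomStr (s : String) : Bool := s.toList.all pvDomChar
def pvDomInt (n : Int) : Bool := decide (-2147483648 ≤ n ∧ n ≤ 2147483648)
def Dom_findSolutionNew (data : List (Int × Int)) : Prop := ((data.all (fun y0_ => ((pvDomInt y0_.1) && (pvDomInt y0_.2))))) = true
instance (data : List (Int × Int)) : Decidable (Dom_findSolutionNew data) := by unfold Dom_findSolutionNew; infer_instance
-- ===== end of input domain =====

-- ===== PORT A =====
-- Header: B precomputes and sorts the edge bounding boxes so each pair's scan stops early (faster, constant-factor).
-- inner 'for k in range(len(data))' loop with its break; sorted([a,b]) destructured is (min a b, max a b), exact.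
def pvValidA (data : List (Int × Int)) (n : Int) (rx1 rx2 ry1 ry2 : Int) : List Int → Bool
  | [] => true
  | k :: ks =>
    let ep1 := PySem.List.pyGetD data k (0, 0)
    let ep2 := PySem.List.pyGetD data (PySem.Int.mod (k + 1) n) (0, 0)
    let ex1 := min ep1.1 ep2.1
    let ex2 := max ep1.1 ep2.1
    let ey1 := min ep1.2 ep2.2
    let ey2 := max ep1.2 ep2.2
    if ey2 > ry1 ∧ ey1 < ry2 ∧ ex2 > rx1 ∧ ex1 < rx2 then false
    else pvValidA data n rx1 rx2 ry1 ry2 ks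

def findSolutionNew (data : List (Int × Int)) : Int :=
  let n : Int := data.length
  (PySem.List.pyRange 0 n 1).foldl (fun maxArea i =>
    (PySem.List.pyRange (i + 1) n 1).foldl (fun maxArea j =>
      let pi := PySem.List.pyGetD data i (0, 0)
      let pj := PySem.List.pyGetD data j (0, 0)
      let width := |pi.1 - pj.1| + 1
      let height := |pi.2 - pj.2| + 1
      let rectArea := width * height
      let rx1 := min pi.1 pj.1
      let rx2 := max pi.1 pj.1
      let ry1 := min pi.2 pj.2
      let ry2 := max pi.2 pj.2
      if pvValidA data n rx1 rx2 ry1 ry2 (PySem.List.pyRange 0 n 1)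
      then max maxArea rectArea else maxArea) maxArea) 0

-- ===== PORT B =====
-- box of one edge: (min xs, max xs, min ys, max ys)
def pvBoxB (p q : Int × Int) : Int × Int × Int × Int :=
  (min p.1 q.1, max p.1 q.1, min p.2 q.2, max p.2 q.2)

-- B's inner loop over the sorted boxes, with both breaks
def pvScanB (rx1 rx2 ry1 ry2 : Int) : List (Int × Int × Int × Int) → Bool
  | [] => false
  | b :: bs =>
    if b.1 ≥ rx2 then false
    else if b.2.1 > rx1 ∧ b.2.2.2 > ry1 ∧ b.2.2.1 < ry2 then true
    else pvScanB rx1 rx2 ry1 ry2 bs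

def findSolutionNew_alt (data : List (Int × Int)) : Int :=
  let n : Int := data.length
  let boxes0 := (data.zip (PySem.List.slice data (some 1) none ++ PySem.List.slice data none (some 1))).map
      (fun pq => pvBoxB pq.1 pq.2)
  let boxes := PySem.List.sorted boxes0 (fun b => b.1) false
  (PySem.List.pyRange 0 n 1).foldl (fun best i =>
    let p := PySem.List.pyGetD data i (0, 0)
    (PySem.List.pyRange (i + 1) n 1).foldl (fun best j =>
      let q := PySem.List.pyGetD data j (0, 0)
      let rx1 := if p.1 ≤ q.1 then p.1 else q.1
      let rx2 := if p.1 ≤ q.1 then q.1 else p.1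
      let ry1 := if p.2 ≤ q.2 then p.2 else q.2
      let ry2 := if p.2 ≤ q.2 then q.2 else p.2
      if ¬ pvScanB rx1 rx2 ry1 ry2 boxes then
        let area := (rx2 - rx1 + 1) * (ry2 - ry1 + 1)
        if area > best then area else best
      else best) best) 0

-- ===== PRECONDITION & SPEC =====
def Spec_findSolutionNew (data : List (Int × Int)) (out : Int) : Prop := out = findSolutionNew_alt data
instance (data : List (Int × Int)) (out : Int) : Decidable (Spec_findSolutionNew data out) := by unfold Spec_findSolutionNew; infer_instance

-- ===== CLAIM (what is proved, stated in full; the proofs are below) =====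
def Claim_equal_findSolutionNew : Prop := ∀ (data : List (Int × Int)), Dom_findSolutionNew data → Spec_findSolutionNew data (findSolutionNew data)

-- ===== LEMMAS AND PROOFS =====
-- overlap test of one edge box against the rectangle (A's condition order)
def pvOv (rx1 rx2 ry1 ry2 : Int) (b : Int × Int × Int × Int) : Bool :=
  decide (b.2.2.2 > ry1 ∧ b.2.2.1 < ry2 ∧ b.2.1 > rx1 ∧ b.1 < rx2)

-- rotation lookup: (l.drop 1 ++ l.take 1)[k] = l[(k+1) % l.length]
theorem pvRotGet {α : Type} (l : List α) (k : Nat) (hk : k < l.length) :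
    (l.drop 1 ++ l.take 1)[k]? = l[(k + 1) % l.length]? := by
  rw [List.getElem?_append]
  rcases Nat.lt_or_ge (k + 1) l.length with h | h
  · have hk1 : k < (l.drop 1).length := by simp; omega
    rw [if_pos hk1, List.getElem?_drop, Nat.mod_eq_of_lt h, Nat.add_comm]
  · have hlen : l.length = k + 1 := by omega
    have hk1 : ¬ k < (l.drop 1).length := by simp; omega
    rw [if_neg hk1]
    have h0 : k - (l.drop 1).length = 0 := by simp; omega
    rw [h0, List.getElem?_take_of_lt (by omega)]
    simp [hlen]

theorem pvRotLen {α : Type} (l : List α) (h : 0 < l.length) :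
    (l.drop 1 ++ l.take 1).length = l.length := by
  simp; omega

-- B's scan with breaks = any over the boxes, given boxes sorted by left x
theorem pvScanB_eq_any (rx1 rx2 ry1 ry2 : Int) (bs : List (Int × Int × Int × Int))
    (hs : bs.Pairwise (fun a b => a.1 ≤ b.1)) :
    pvScanB rx1 rx2 ry1 ry2 bs = bs.any (pvOv rx1 rx2 ry1 ry2) := by
  induction bs with
  | nil => rfl
  | cons b bs ih =>
    rcases List.pairwise_cons.mp hs with ⟨hb, htail⟩
    rw [pvScanB]
    by_cases h1 : b.1 ≥ rx2
    · rw [if_pos h1]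
      have hall : ∀ c ∈ b :: bs, pvOv rx1 rx2 ry1 ry2 c = false := by
        intro c hc
        rcases List.mem_cons.mp hc with rfl | hc
        · simp [pvOv]; intro _ _ _; omega
        · have := hb c hc
          simp [pvOv]; intro _ _ _; omega
      exact ((List.any_eq_false).mpr (fun c hc => by simp [hall c hc])).symm
    · rw [if_neg h1]
      by_cases h2 : b.2.1 > rx1 ∧ b.2.2.2 > ry1 ∧ b.2.2.1 < ry2
      · rw [if_pos h2]
        have hb' : pvOv rx1 rx2 ry1 ry2 b = true := by
          simp [pvOv]; exact ⟨h2.2.1, h2.2.2, h2.1, by omega⟩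
        simp [List.any_cons, hb']
      · rw [if_neg h2]
        have hb' : pvOv rx1 rx2 ry1 ry2 b = false := by
          simp [pvOv]; intro hy2 hy1 hx2; exact absurd ⟨hx2, hy2, hy1⟩ h2
        simp [List.any_cons, hb', ih htail]

-- A's inner loop = not-any over the index list
theorem pvValidA_eq_not_any (data : List (Int × Int)) (n rx1 rx2 ry1 ry2 : Int)
    (ks : List Int) :
    pvValidA data n rx1 rx2 ry1 ry2 ks
      = !(ks.any (fun k =>
          pvOv rx1 rx2 ry1 ry2
            (pvBoxB (PySem.List.pyGetD data k (0, 0))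
              (PySem.List.pyGetD data (PySem.Int.mod (k + 1) n) (0, 0))))) := by
  induction ks with
  | nil => rfl
  | cons k ks ih =>
    rw [pvValidA]
    by_cases h : (let ep1 := PySem.List.pyGetD data k ((0:Int), (0:Int));
        let ep2 := PySem.List.pyGetD data (PySem.Int.mod (k + 1) n) ((0:Int), (0:Int));
        max ep1.2 ep2.2 > ry1 ∧ min ep1.2 ep2.2 < ry2 ∧ max ep1.1 ep2.1 > rx1 ∧ min ep1.1 ep2.1 < rx2)
    · rw [if_pos h]
      have hb : pvOv rx1 rx2 ry1 ry2
          (pvBoxB (PySem.List.pyGetD data k (0, 0))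
            (PySem.List.pyGetD data (PySem.Int.mod (k + 1) n) (0, 0))) = true := by
        simp only [pvOv, pvBoxB, decide_eq_true_eq]
        exact h
      simp [List.any_cons, hb]
    · rw [if_neg h]
      have hb : pvOv rx1 rx2 ry1 ry2
          (pvBoxB (PySem.List.pyGetD data k (0, 0))
            (PySem.List.pyGetD data (PySem.Int.mod (k + 1) n) (0, 0))) = false := by
        simp only [pvOv, pvBoxB, decide_eq_false_iff_not]
        exact h
      simp [List.any_cons, hb, ih]

-- the k-th index term is the box of the k-th zipped edge
theorem pvIdxElem (data : List (Int × Int)) (k : Nat) (hk : k < data.length) :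
    pvBoxB (PySem.List.pyGetD data (k : Int) (0, 0))
        (PySem.List.pyGetD data (PySem.Int.mod ((k : Int) + 1) (data.length : Int)) (0, 0))
      = pvBoxB data[k] ((data.drop 1 ++ data.take 1)[k]'(by rw [pvRotLen data (by omega)]; exact hk)) := by
  have hn : 0 < data.length := by omega
  have hmemlt : (k + 1) % data.length < data.length := Nat.mod_lt _ hn
  have hget1 : PySem.List.pyGetD data (k : Int) ((0:Int),(0:Int)) = data[k] := by
    rw [PySem.List.pyGetD_natCast]; exact List.getD_eq_getElem data _ hk
  have hmod : PySem.Int.mod ((k : Int) + 1) (data.length : Int)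
      = (((k + 1) % data.length : Nat) : Int) := by
    have h1 : ((k:Int) + 1) = ((k + 1 : Nat) : Int) := by push_cast; ring
    rw [h1, PySem.Int.mod_natCast]
  have hget2 : PySem.List.pyGetD data (PySem.Int.mod ((k : Int) + 1) (data.length : Int)) ((0:Int),(0:Int))
      = data[(k + 1) % data.length] := by
    rw [hmod, PySem.List.pyGetD_natCast]; exact List.getD_eq_getElem data _ hmemlt
  have hrot : (data.drop 1 ++ data.take 1)[k]'(by rw [pvRotLen data hn]; exact hk)
      = data[(k + 1) % data.length] := by
    have h := pvRotGet data k hk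
    rw [List.getElem?_eq_getElem (by rw [pvRotLen data hn]; exact hk),
        List.getElem?_eq_getElem hmemlt] at h
    exact Option.some_injective _ h
  rw [hget1, hget2, hrot]

-- index-based any over range(n) = any over the zipped edge list
theorem pvAnyRange_eq_anyZip (data : List (Int × Int)) (rx1 rx2 ry1 ry2 : Int) :
    ((PySem.List.pyRange 0 (data.length : Int) 1).any (fun k =>
        pvOv rx1 rx2 ry1 ry2
          (pvBoxB (PySem.List.pyGetD data k (0, 0))
            (PySem.List.pyGetD data (PySem.Int.mod (k + 1) (data.length : Int)) (0, 0)))))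
      = ((data.zip (data.drop 1 ++ data.take 1)).map (fun pq => pvBoxB pq.1 pq.2)).any
          (pvOv rx1 rx2 ry1 ry2) := by
  rcases Nat.eq_zero_or_pos data.length with h0 | hn
  · rw [List.eq_nil_of_length_eq_zero h0]; rfl
  have hzlen : (data.zip (data.drop 1 ++ data.take 1)).length = data.length := by
    rw [List.length_zip, pvRotLen data hn, Nat.min_self]
  rw [List.any_map]
  apply Bool.eq_iff_iff.mpr
  simp only [List.any_eq_true]
  constructor
  · rintro ⟨kI, hkmem, hov⟩
    obtain ⟨hk0, hkn⟩ := (PySem.List.mem_pyRange_one).mp hkmem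
    set k : Nat := kI.toNat with hkdef
    have hkI : kI = (k : Int) := by omega
    have hk : k < data.length := by omega
    refine ⟨(data.zip (data.drop 1 ++ data.take 1))[k]'(by omega), List.getElem_mem _, ?_⟩
    rw [List.getElem_zip]
    rw [hkI, pvIdxElem data k hk] at hov
    exact hov
  · rintro ⟨pq, hmem, hov⟩
    obtain ⟨k, hk, rfl⟩ := List.mem_iff_getElem.mp hmem
    have hk' : k < data.length := by omega
    refine ⟨(k : Int), (PySem.List.mem_pyRange_one).mpr (by omega), ?_⟩
    rw [pvIdxElem data k hk']
    rw [List.getElem_zip] at hov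
    exact hov

-- per-rectangle core: A's inner loop equals the negation of B's scan over the sorted boxes
theorem pvCore (data : List (Int × Int)) (rx1 rx2 ry1 ry2 : Int) :
    pvValidA data (data.length : Int) rx1 rx2 ry1 ry2
        (PySem.List.pyRange 0 (data.length : Int) 1)
      = !(pvScanB rx1 rx2 ry1 ry2
          (PySem.List.sorted
            ((data.zip (PySem.List.slice data (some 1) none ++ PySem.List.slice data none (some 1))).map
              (fun pq => pvBoxB pq.1 pq.2)) (fun b => b.1) false)) := by
  rw [PySem.List.slice_from data (show (0:Int) ≤ 1 by omega), PySem.List.slice_to data (show (0:Int) ≤ 1 by omega)]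
  simp only [Int.toNat_one]
  rw [pvValidA_eq_not_any, pvAnyRange_eq_anyZip,
      pvScanB_eq_any _ _ _ _ _ (PySem.List.sorted_pairwise _ _),
      List.Perm.any_eq (PySem.List.sorted_perm _ _ _)]

-- the sorted box list B precomputes (proof-side abbreviation)
def pvBoxes (data : List (Int × Int)) : List (Int × Int × Int × Int) :=
  PySem.List.sorted
    ((data.zip (PySem.List.slice data (some 1) none ++ PySem.List.slice data none (some 1))).map
      (fun pq => pvBoxB pq.1 pq.2)) (fun b => b.1) false

-- one (i, j) pair: A's update of the running maximum equals B's
theorem pvPair (data : List (Int × Int)) (ma : Int) (p q : Int × Int) :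
    (if pvValidA data (data.length : Int) (min p.1 q.1) (max p.1 q.1) (min p.2 q.2) (max p.2 q.2)
        (PySem.List.pyRange 0 (data.length : Int) 1)
     then max ma ((|p.1 - q.1| + 1) * (|p.2 - q.2| + 1)) else ma)
    = (if ¬ pvScanB (if p.1 ≤ q.1 then p.1 else q.1) (if p.1 ≤ q.1 then q.1 else p.1)
            (if p.2 ≤ q.2 then p.2 else q.2) (if p.2 ≤ q.2 then q.2 else p.2) (pvBoxes data)
       then (if ((if p.1 ≤ q.1 then q.1 else p.1) - (if p.1 ≤ q.1 then p.1 else q.1) + 1) *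
                ((if p.2 ≤ q.2 then q.2 else p.2) - (if p.2 ≤ q.2 then p.2 else q.2) + 1) > ma
             then ((if p.1 ≤ q.1 then q.1 else p.1) - (if p.1 ≤ q.1 then p.1 else q.1) + 1) *
                  ((if p.2 ≤ q.2 then q.2 else p.2) - (if p.2 ≤ q.2 then p.2 else q.2) + 1)
             else ma)
       else ma) := by
  rw [show (if p.1 ≤ q.1 then p.1 else q.1) = min p.1 q.1 from (min_def _ _).symm,
      show (if p.1 ≤ q.1 then q.1 else p.1) = max p.1 q.1 from (max_def _ _).symm,
      show (if p.2 ≤ q.2 then p.2 else q.2) = min p.2 q.2 from (min_def _ _).symm,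
      show (if p.2 ≤ q.2 then q.2 else p.2) = max p.2 q.2 from (max_def _ _).symm]
  rw [pvCore data]
  have harea : (|p.1 - q.1| + 1) * (|p.2 - q.2| + 1)
      = (max p.1 q.1 - min p.1 q.1 + 1) * (max p.2 q.2 - min p.2 q.2 + 1) := by
    rw [max_sub_min_eq_abs, max_sub_min_eq_abs, abs_sub_comm q.1 p.1, abs_sub_comm q.2 p.2]
  by_cases h : pvScanB (min p.1 q.1) (max p.1 q.1) (min p.2 q.2) (max p.2 q.2) (pvBoxes data) = true
  · simp [pvBoxes] at h; simp [pvBoxes, h]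
  · simp [pvBoxes] at h; simp [pvBoxes, h, harea]
    rw [max_def]; split_ifs <;> omega

theorem pvMain (data : List (Int × Int)) : findSolutionNew data = findSolutionNew_alt data := by
  simp only [findSolutionNew, findSolutionNew_alt]
  congr 1
  funext ma i
  congr 1
  funext ma' j
  exact pvPair data ma' (PySem.List.pyGetD data i (0, 0)) (PySem.List.pyGetD data j (0, 0))

-- ===== VERDICT (by name: the statement is the Claim_ definition above) =====
theorem findSolutionNew_spec : Claim_equal_findSolutionNew := by
  intro data _
  unfold Spec_findSolutionNew
  exact pvMain data
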